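-- pv_equiv track=rewrite | github.com/zeyu-chen/25t1-comp9021-labs | Lab 6/Solutions/ex_1_sol.py | f1_1
-- ===== SOURCE A (Python) =====
-- def f1_1(L: list[list[int]]) -> tuple[list[int], list[list[int]]]:
--     """
--     Flattens and sorts all elements from a list of lists, then regroups
--     the sorted elements based on the original sublist lengths.
--
--     Args:
--         L: A list where each element is a list of integers.
--
--     Returns:
--         A tuple containing two lists:
--         1. F: A single list with all integers from L, sorted.
--         2. R: A list of lists, where sorted elements are regrouped
--            according to the original lengths of sublists in L.
--     """
--     # Calculate the lengths of each sublist in the input list L.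
--     # e.g., if L = [[3, 1], [2]], lengths will be [2, 1]
--     lengths = [len(L1) for L1 in L]
--
--     # Flatten the list of lists L into a single list and sort it.
--     # The list comprehension (e for L1 in L for e in L1) iterates through
--     # each sublist (L1) and then each element (e) in that sublist.
--     # sorted() then sorts the resulting flat list.
--     # e.g., if L = [[3, 1], [2]], F will be [1, 2, 3]
--     F = sorted(e for L1 in L for e in L1)
--
--     # Reconstruct the list of lists R using the sorted elements F
--     # and the original lengths.
--     R = []
--     # Keep track of the starting index for slicing F.
--     i = 0
--     # Iterate 'n' from 0 up to the number of original sublists.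
--     # In each iteration, 'n' corresponds to the index of the length
--     # we need to use from the 'lengths' list.
--     for n in range(len(L)):
--         # Append a slice of F to R.
--         # The slice starts at index 'i'.
--         # The slice ends at index 'i + lengths[n]'.
--         # The walrus operator (:=) updates 'i' in place for the next iteration.
--         # It assigns the value of 'i + lengths[n]' to 'i' *after* the
--         # original value of 'i' is used for the slice's end index.
--         # 1st iteration (n=0): L=[[3, 1], [2]], lengths=[2, 1], F=[1, 2, 3], i=0
--         #   Slice F[0 : (i := 0 + 2)] -> F[0:2] which is [1, 2]. i becomes 2. R = [[1, 2]]
--         # 2nd iteration (n=1): lengths[1]=1, i=2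
--         #   Slice F[2 : (i := 2 + 1)] -> F[2:3] which is [3]. i becomes 3. R = [[1, 2], [3]]
--         R.append(F[i : (i := i + lengths[n])])
--
--     # Return the sorted flat list F and the reconstructed list R.
--     return F, R
-- ===== SOURCE B (Python) =====
-- def f1_1(L: list[list[int]]) -> tuple[list[int], list[list[int]]]:
--     F = sorted(e for L1 in L for e in L1)
--     it = iter(F)
--     R = [[next(it) for _ in L1] for L1 in L]
--     return F, R
-- ===== Notes on version B (the rewrite author's own statement) =====
-- stated objective: idiomatic
-- what changed: Regrouping no longer keeps a lengths list and an integer slice index updated by a walrus assignment; B consumes a single iterator over the sorted flat list, taking one group per original sublist.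
import Mathlib
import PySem

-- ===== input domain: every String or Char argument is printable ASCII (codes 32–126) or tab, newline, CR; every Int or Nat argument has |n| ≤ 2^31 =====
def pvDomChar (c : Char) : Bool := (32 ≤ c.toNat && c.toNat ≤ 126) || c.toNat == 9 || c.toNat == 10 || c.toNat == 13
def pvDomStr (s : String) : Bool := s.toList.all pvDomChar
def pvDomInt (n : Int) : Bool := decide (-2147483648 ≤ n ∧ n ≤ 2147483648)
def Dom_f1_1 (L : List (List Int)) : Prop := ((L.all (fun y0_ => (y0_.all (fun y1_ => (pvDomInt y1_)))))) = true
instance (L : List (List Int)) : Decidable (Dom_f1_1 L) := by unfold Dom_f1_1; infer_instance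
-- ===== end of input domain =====

-- B replaces A's lengths list + walrus-updated slice index by consuming one iterator over
-- the sorted flat list, one group per original sublist (objective: more idiomatic).

-- ===== PORT A =====
-- lengths = [len(L1) for L1 in L]; F = sorted(flat); loop n in range(len(L)) appending F[i : (i := i + lengths[n])]
def f1_1 (L : List (List Int)) : List Int × List (List Int) :=
  let lengths : List Int := L.map (fun L1 => (L1.length : Int))
  let F : List Int := PySem.List.sorted (L.flatMap (fun L1 => L1)) (fun e => e) false
  let st : List (List Int) × Int :=
    (PySem.List.pyRange 0 (L.length : Int) 1).foldl
      (fun (st : List (List Int) × Int) n =>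
        let j := st.2 + PySem.List.pyGetD lengths n 0
        (st.1 ++ [PySem.List.slice F (some st.2) (some j)], j))
      ([], 0)
  (F, st.1)

-- ===== PORT B =====
-- '[next(it) for _ in L1]' takes len(L1) elements off the iterator; the iterator over F is
-- modelled exactly by the remaining suffix of F: take the group, recurse on the dropped rest.
def pvRegroup (rest : List Int) : List (List Int) → List (List Int)
  | [] => []
  | L1 :: Ls => rest.take L1.length :: pvRegroup (rest.drop L1.length) Ls

def f1_1_alt (L : List (List Int)) : List Int × List (List Int) :=
  let F : List Int := PySem.List.sorted (L.flatMap (fun L1 => L1)) (fun e => e) false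
  (F, pvRegroup F L)

-- ===== PRECONDITION & SPEC =====
def Spec_f1_1 (L : List (List Int)) (out : List Int × List (List Int)) : Prop := out = f1_1_alt L
instance (L : List (List Int)) (out : List Int × List (List Int)) : Decidable (Spec_f1_1 L out) := by unfold Spec_f1_1; infer_instance

-- ===== CLAIM (what is proved, stated in full; the proofs are below) =====
def Claim_equal_f1_1 : Prop := ∀ (L : List (List Int)), Dom_f1_1 L → Spec_f1_1 L (f1_1 L)

-- ===== LEMMAS AND PROOFS =====

-- A's slice loop, started at any natural index i with accumulator acc, appends exactly
-- the regrouping of the suffix F.drop i.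
lemma pvLoop_eq (Ls : List (List Int)) (F : List Int) :
    ∀ (acc : List (List Int)) (i : Nat),
      (Ls.foldl
        (fun (st : List (List Int) × Int) L1 =>
          let j := st.2 + (L1.length : Int)
          (st.1 ++ [PySem.List.slice F (some st.2) (some j)], j))
        (acc, (i : Int))).1 = acc ++ pvRegroup (F.drop i) Ls := by
  induction Ls with
  | nil => intro acc i; simp [pvRegroup]
  | cons L1 Ls ih =>
    intro acc i
    have hcast : (i : Int) + (L1.length : Int) = ((i + L1.length : Nat) : Int) := by push_cast; ring
    simp only [List.foldl_cons]
    rw [PySem.List.slice_natCast_add]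
    rw [hcast, ih]
    simp [pvRegroup, List.drop_drop]

-- A's range(len(L)) loop with lengths[n] lookups is the fold of the length list itself
lemma pvRange_to_foldl (lengths : List Int) (F : List Int) :
    (PySem.List.pyRange 0 (lengths.length : Int) 1).foldl
      (fun (st : List (List Int) × Int) n =>
        (st.1 ++ [PySem.List.slice F (some st.2) (some (st.2 + PySem.List.pyGetD lengths n 0))], st.2 + PySem.List.pyGetD lengths n 0))
      ([], 0) =
    lengths.foldl (fun (st : List (List Int) × Int) v =>
        (st.1 ++ [PySem.List.slice F (some st.2) (some (st.2 + v))], st.2 + v)) ([], 0) := by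
  have h := PySem.List.foldl_pyRange_pyGetD' (xs := lengths) (d := 0)
    (f := fun (st : List (List Int) × Int) v =>
        (st.1 ++ [PySem.List.slice F (some st.2) (some (st.2 + v))], st.2 + v))
    (init := (([], 0) : List (List Int) × Int)) (a := 0) (by omega)
  simpa using h

theorem pvSpec_aux (L : List (List Int)) : f1_1 L = f1_1_alt L := by
  simp only [f1_1, f1_1_alt]
  rw [show ((L.length : Int)) = ((L.map (fun L1 => (L1.length : Int))).length : Int) by simp,
      pvRange_to_foldl, List.foldl_map]
  have := pvLoop_eq L (PySem.List.sorted (L.flatMap (fun L1 => L1)) (fun e => e) false) [] 0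
  simp only [Nat.cast_zero, List.drop_zero] at this
  simpa using this

-- ===== VERDICT (by name: the statement is the Claim_ definition above) =====
theorem f1_1_spec : Claim_equal_f1_1 := by
  intro L _
  unfold Spec_f1_1
  exact pvSpec_aux L
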